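-- pv_equiv track=rewrite | github.com/pypi-data/pypi-mirror-26 | packages/reflowrst/reflowrst-1.0.9.tar.gz/reflowrst-1.0.9/reflowrst/is_field.py | is_field
-- ===== SOURCE A (Python) =====
-- def other_colon_present(words):
--     for word in words:
--         if word.endswith(':') and not word.endswith('\\:'):
--             return True
--     return False
--
-- def is_field(lines, index):
--     words = lines[index].lstrip().split(' ')
--
--     if not words[0].endswith(':'):
--         if not words[0].startswith(':'):
--             return False
--
--         if not other_colon_present(words):
--             return False
--
--         else:
--             return True
--
--     leading_space = lines[index].replace(lines[index].lstrip(), '')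
--
--     if (index < len(lines) - 1 and
--         not is_field(lines, index + 1) and
--         not lines[index + 1].startswith(leading_space + ' ') and
--         not lines[index + 1] == ''):
--         return False
--
--     return True
-- ===== SOURCE B (Python) =====
-- def is_field(lines, index):
--     n = len(lines)
--     res = True
--     for i in reversed(range(index, n)):
--         line = lines[i]
--         stripped = line.lstrip()
--         words = stripped.split(' ')
--         w0 = words[0]
--         if w0.endswith(':'):
--             leading = line.replace(stripped, '')
--             res = not (i < n - 1
--                        and not res
--                        and not lines[i + 1].startswith(leading + ' ')
--                        and lines[i + 1] != '')
--         else: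
--             res = w0.startswith(':') and any(
--                 w.endswith(':') and not w.endswith('\\:') for w in words)
--     return res
-- ===== Notes on version B (the rewrite author's own statement) =====
-- stated objective: alternative
-- what changed: Replaces A's top-down recursion (each line re-examining the verdict of the next) by an iterative backward pass that folds one boolean accumulator over the line indices from the end of the list down to index, so no recursion or call stack is needed.
import Mathlib
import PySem

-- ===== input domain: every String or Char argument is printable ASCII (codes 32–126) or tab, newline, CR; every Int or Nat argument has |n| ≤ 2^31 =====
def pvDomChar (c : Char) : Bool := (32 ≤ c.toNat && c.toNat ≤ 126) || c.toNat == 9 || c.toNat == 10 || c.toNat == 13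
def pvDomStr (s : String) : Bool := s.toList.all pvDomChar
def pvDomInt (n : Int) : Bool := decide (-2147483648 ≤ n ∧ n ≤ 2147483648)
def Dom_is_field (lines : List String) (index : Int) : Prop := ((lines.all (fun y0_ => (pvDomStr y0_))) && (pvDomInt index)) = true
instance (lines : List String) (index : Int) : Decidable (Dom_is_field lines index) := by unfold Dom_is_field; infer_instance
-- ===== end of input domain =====

-- B rewrites A's top-down recursion as an iterative backward pass folding one boolean over the indices; equivalence proved on all indices where A returns (Pre_).

-- ===== PORT A =====
-- s.split(' '): exact via split?, whose none case is only sep = "" (never hit here)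
def pySplitSpace (s : String) : List String := (PySem.Str.split? s " ").getD [s]

def other_colon_present (words : List String) : Bool :=
  words.any (fun w => PySem.Str.endswith w ":" && !(PySem.Str.endswith w "\\:"))

def is_field (lines : List String) (index : Int) : Bool :=
  match PySem.List.pyGet? lines index with
  | none => false   -- lines[index] raises IndexError; excluded by Pre_is_field
  | some line =>
    let words := pySplitSpace (PySem.Str.lstrip line)
    let w0 := words.headD ""   -- words[0]; split on a nonempty separator is never empty, so exact
    if !(PySem.Str.endswith w0 ":") then
      if !(PySem.Str.startswith w0 ":") then false
      else if !(other_colon_present words) then false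
      else true
    else
      let leading_space := PySem.Str.replace line (PySem.Str.lstrip line) ""
      if index < (lines.length : Int) - 1 then   -- short-circuit 'and' as nested ifs
        if !(is_field lines (index + 1)) &&
           !(PySem.Str.startswith (PySem.List.pyGetD lines (index + 1) "") (leading_space ++ " ")) &&
           !(PySem.List.pyGetD lines (index + 1) "" == "") then false
        else true
      else true
termination_by ((lines.length : Int) - index).toNat
decreasing_by omega

-- ===== PORT B =====
-- loop body of B's backward pass (one iteration of the 'for i in reversed(range(index, n))' loop)
def pvStep (lines : List String) (res : Bool) (i : Int) : Bool :=
  let line := PySem.List.pyGetD lines i ""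
  let stripped := PySem.Str.lstrip line
  let words := pySplitSpace stripped
  let w0 := words.headD ""
  if PySem.Str.endswith w0 ":" then
    let leading := PySem.Str.replace line stripped ""
    !(decide (i < (lines.length : Int) - 1) && !res &&
      !(PySem.Str.startswith (PySem.List.pyGetD lines (i + 1) "") (leading ++ " ")) &&
      !(PySem.List.pyGetD lines (i + 1) "" == ""))
  else
    PySem.Str.startswith w0 ":" &&
      words.any (fun w => PySem.Str.endswith w ":" && !(PySem.Str.endswith w "\\:"))

def is_field_alt (lines : List String) (index : Int) : Bool :=
  (PySem.List.pyRange index (lines.length : Int) 1).reverse.foldl (pvStep lines) true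

-- ===== PRECONDITION & SPEC =====
-- Pre_ is exactly where Python A returns: lines[index] must not raise IndexError.
def Pre_is_field (lines : List String) (index : Int) : Prop :=
  -(lines.length : Int) ≤ index ∧ index < (lines.length : Int)
instance (lines : List String) (index : Int) : Decidable (Pre_is_field lines index) := by
  unfold Pre_is_field; infer_instance
def pvWitness_is_field : List String × Int := ([":a b:"], 0)

def Spec_is_field (lines : List String) (index : Int) (out : Bool) : Prop := out = is_field_alt lines index
instance (lines : List String) (index : Int) (out : Bool) : Decidable (Spec_is_field lines index out) := by unfold Spec_is_field; infer_instance

-- ===== CLAIM (what is proved, stated in full; the proofs are below) =====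
def Claim_equal_is_field : Prop := ∀ (lines : List String) (index : Int), Dom_is_field lines index → Pre_is_field lines index → Spec_is_field lines index (is_field lines index)

-- ===== LEMMAS AND PROOFS =====

lemma pv_getD_of_get? {α : Type} (xs : List α) (i : Int) (d x : α)
    (h : PySem.List.pyGet? xs i = some x) : PySem.List.pyGetD xs i d = x := by
  simp [PySem.List.pyGetD, h]

lemma pv_alt_unfold (lines : List String) (i : Int) (h2 : i < (lines.length : Int)) :
    is_field_alt lines i = pvStep lines (is_field_alt lines (i + 1)) i := by
  unfold is_field_alt
  rw [PySem.List.pyRange_one_cons h2, List.reverse_cons, List.foldl_append]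
  simp only [List.foldl_cons, List.foldl_nil]

lemma pv_key (lines : List String) (i : Int)
    (h1 : -(lines.length : Int) ≤ i) (h2 : i < (lines.length : Int)) :
    is_field lines i = is_field_alt lines i := by
  obtain ⟨line, hline⟩ : ∃ x, PySem.List.pyGet? lines i = some x := by
    cases hq : PySem.List.pyGet? lines i with
    | some x => exact ⟨x, rfl⟩
    | none =>
      rw [PySem.List.pyGet?_eq_none_iff] at hq
      exact absurd ⟨h1, h2⟩ hq
  have hD : PySem.List.pyGetD lines i "" = line := pv_getD_of_get? lines i "" line hline
  rw [is_field, hline, pv_alt_unfold lines i h2]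
  unfold pvStep
  simp only [hD]
  cases hE : PySem.Str.endswith ((pySplitSpace (PySem.Str.lstrip line)).headD "") ":" with
  | false =>
    simp only [Bool.not_false, if_true, Bool.false_eq_true, if_false]
    have hOA : ((pySplitSpace (PySem.Str.lstrip line)).any fun w =>
        PySem.Str.endswith w ":" && !PySem.Str.endswith w "\\:") =
        other_colon_present (pySplitSpace (PySem.Str.lstrip line)) := rfl
    rw [hOA]
    cases hS : PySem.Str.startswith ((pySplitSpace (PySem.Str.lstrip line)).headD "") ":" <;>
      cases hO : other_colon_present (pySplitSpace (PySem.Str.lstrip line)) <;> simp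
  | true =>
    simp only [Bool.not_true, Bool.false_eq_true, if_false, if_true]
    by_cases hlt : i < (lines.length : Int) - 1
    · rw [← pv_key lines (i + 1) (by omega) (by omega)]
      simp only [decide_eq_true hlt, Bool.true_and]
      generalize is_field lines (i + 1) = a
      cases a <;>
        cases PySem.Str.startswith (PySem.List.pyGetD lines (i + 1) "")
          (PySem.Str.replace line (PySem.Str.lstrip line) "" ++ " ") <;>
        cases (PySem.List.pyGetD lines (i + 1) "" == "") <;> simp [hlt]
    · rw [if_neg hlt]
      simp [hlt]
termination_by ((lines.length : Int) - i).toNat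
decreasing_by omega

-- ===== VERDICT (by name: the statement is the Claim_ definition above) =====
theorem is_field_spec : Claim_equal_is_field := by
  intro lines index _ hpre
  unfold Spec_is_field
  exact pv_key lines index hpre.1 hpre.2
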